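-- pv_equiv track=rewrite | github.com/Lee-Park-Bae-Project/Algorithm | problems/programmers/12914/brillante06.py | solution
-- ===== SOURCE A (Python) =====
-- def solution(n):
--     answer = 0
--     a, b = 1, 2
--     if n == 1:
--         return 1
--     elif n == 2:
--         return 2
--     for i in range(3, n):
--         temp = b
--         b = a+b
--         a = temp
--
--     return (a+b) % 1234567
-- ===== SOURCE B (Python) =====
-- M = 1234567
--
--
-- def _fib_pair(k):
--     # returns (F(k) % M, F(k+1) % M) by fast doubling, k >= 0
--     if k == 0:
--         return (0, 1)
--     a, b = _fib_pair(k // 2)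
--     c = a * (2 * b - a) % M
--     d = (a * a + b * b) % M
--     if k % 2:
--         return (d, (c + d) % M)
--     return (c, d)
--
--
-- def solution(n):
--     if n < 0:
--         return 0
--     return _fib_pair(n + 1)[0]
-- ===== Notes on version B (the rewrite author's own statement) =====
-- stated objective: faster
-- what changed: Replaces the O(n) iterative Fibonacci loop with recursive fast doubling modulo 1234567 (O(log n) multiplications).
-- intended difference: For n <= 0 A's loop never runs and it returns the leftover 1+2 = 3; B returns the intended staircase count: 1 way for n = 0 and 0 ways for negative n. — e.g. on solution(0): A returns 3, B returns 1
import Mathlib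
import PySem

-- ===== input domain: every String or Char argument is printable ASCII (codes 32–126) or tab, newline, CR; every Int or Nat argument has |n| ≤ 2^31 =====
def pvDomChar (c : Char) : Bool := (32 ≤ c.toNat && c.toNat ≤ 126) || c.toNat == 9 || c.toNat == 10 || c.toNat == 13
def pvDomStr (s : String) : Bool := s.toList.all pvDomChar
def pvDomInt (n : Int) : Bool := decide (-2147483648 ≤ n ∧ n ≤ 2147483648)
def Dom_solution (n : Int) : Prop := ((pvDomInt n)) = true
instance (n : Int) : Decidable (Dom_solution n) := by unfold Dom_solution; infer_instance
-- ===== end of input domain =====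

-- B replaces A's linear Fibonacci loop by recursive fast doubling mod 1234567; on n ≤ 0
-- (stated intended difference D_) B returns the intended count instead of A's leftover 3.

-- ===== PORT A =====
def solution (n : Int) : Int :=
  if n = 1 then 1
  else if n = 2 then 2
  else
    let p := (PySem.List.pyRange 3 n 1).foldl
      (fun (p : Int × Int) _ => (p.2, p.1 + p.2)) (1, 2)
    PySem.Int.mod (p.1 + p.2) 1234567

-- ===== PORT B =====
-- port of _fib_pair; its Python argument k is a nonnegative int recursing on k // 2 → Nat
def fibPairB : Nat → Int × Int
  | 0 => (0, 1)
  | (j+1) =>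
    let p := fibPairB ((j+1)/2)
    let a := p.1
    let b := p.2
    let c := PySem.Int.mod (a * (2 * b - a)) 1234567
    let d := PySem.Int.mod (a * a + b * b) 1234567
    if (j+1) % 2 = 1 then (d, PySem.Int.mod (c + d) 1234567) else (c, d)
decreasing_by exact Nat.div_lt_self (Nat.succ_pos j) one_lt_two

def solution_alt (n : Int) : Int :=
  if n < 0 then 0 else (fibPairB (n + 1).toNat).1

-- ===== PRECONDITION & SPEC =====
-- For n ≤ 0 A's loop never runs and it returns the leftover 1+2 = 3; B returns the
-- intended staircase count: 1 way for n = 0 and 0 ways for negative n.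
def D_solution (n : Int) : Prop := n ≤ 0
instance (n : Int) : Decidable (D_solution n) := by unfold D_solution; infer_instance
def Spec_solution (n : Int) (out : Int) : Prop := ¬ D_solution n → out = solution_alt n
instance (n : Int) (out : Int) : Decidable (Spec_solution n out) := by unfold Spec_solution; infer_instance
def pvDiffWitness_solution : Int := 0
def pvDiffWitnessOut_solution : Int × Int := (3, 1)

-- ===== CLAIM (what is proved, stated in full; the proofs are below) =====
def Claim_unchanged_solution : Prop := ∀ (n : Int), Dom_solution n → Spec_solution n (solution n)
def Claim_changed_solution : Prop := Dom_solution (pvDiffWitness_solution) ∧ D_solution (pvDiffWitness_solution) ∧ solution (pvDiffWitness_solution) = pvDiffWitnessOut_solution.1 ∧ solution_alt (pvDiffWitness_solution) = pvDiffWitnessOut_solution.2 ∧ pvDiffWitnessOut_solution.1 ≠ pvDiffWitnessOut_solution.2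
def Claim_exact_solution : Prop := ∀ (n : Int), Dom_solution n → D_solution n → solution n ≠ solution_alt n

-- ===== LEMMAS AND PROOFS =====

theorem fibPairB_eq (k : Nat) :
    fibPairB k = ((Nat.fib k : Int) % 1234567, (Nat.fib (k+1) : Int) % 1234567) := by
  induction k using Nat.strong_induction_on with
  | _ k IH =>
    match k with
    | 0 => simp [fibPairB]
    | (j+1) =>
      rw [fibPairB, IH ((j+1)/2) (Nat.div_lt_self (Nat.succ_pos j) one_lt_two)]
      set m := (j+1)/2 with hm
      have hdm : 2 * m + (j+1) % 2 = j + 1 := by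
        rw [hm]; omega
      have hM : (0:Int) < 1234567 := by norm_num
      simp only [PySem.Int.mod_eq_emod_of_pos hM]
      have ha : ((Nat.fib m : Int) % 1234567) ≡ (Nat.fib m : Int) [ZMOD 1234567] :=
        Int.emod_emod_of_dvd _ dvd_rfl
      have hb : ((Nat.fib (m+1) : Int) % 1234567) ≡ (Nat.fib (m+1) : Int) [ZMOD 1234567] :=
        Int.emod_emod_of_dvd _ dvd_rfl
      have hsub : (Nat.fib m : Nat) ≤ 2 * Nat.fib (m+1) := by
        have := Nat.fib_le_fib_succ (n := m); omega
      have hc2 : ((Nat.fib m : Int)) * (2 * (Nat.fib (m+1) : Int) - (Nat.fib m : Int))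
          = (Nat.fib (2*m) : Int) := by
        rw [Nat.fib_two_mul]; push_cast [hsub]; ring
      have hcm : ((Nat.fib m : Int) % 1234567) * (2 * ((Nat.fib (m+1) : Int) % 1234567) - (Nat.fib m : Int) % 1234567) % 1234567
          = (Nat.fib (2*m) : Int) % 1234567 := by
        calc _ = ((Nat.fib m : Int)) * (2 * (Nat.fib (m+1) : Int) - (Nat.fib m : Int)) % 1234567 :=
              ha.mul (((Int.ModEq.refl 2).mul hb).sub ha)
          _ = _ := by rw [hc2]
      have hd2 : (Nat.fib m : Int) * (Nat.fib m : Int) + (Nat.fib (m+1) : Int) * (Nat.fib (m+1) : Int)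
          = (Nat.fib (2*m+1) : Int) := by
        rw [Nat.fib_two_mul_add_one]; push_cast; ring
      have hdm2 : ((Nat.fib m : Int) % 1234567) * ((Nat.fib m : Int) % 1234567) + ((Nat.fib (m+1) : Int) % 1234567) * ((Nat.fib (m+1) : Int) % 1234567)
          ≡ (Nat.fib (2*m+1) : Int) [ZMOD 1234567] := by
        calc _ ≡ (Nat.fib m : Int) * (Nat.fib m : Int) + (Nat.fib (m+1) : Int) * (Nat.fib (m+1) : Int) [ZMOD 1234567] :=
              (ha.mul ha).add (hb.mul hb)
          _ = _ := hd2
      rcases Nat.mod_two_eq_zero_or_one (j+1) with hpar | hpar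
      · -- even: j+1 = 2*m
        have hj : j + 1 = 2*m := by omega
        simp only [hpar]
        norm_num
        refine ⟨?_, ?_⟩
        · rw [hcm, hj]
        · rw [hdm2, hj]
      · -- odd: j+1 = 2*m+1
        have hj : j + 1 = 2*m+1 := by omega
        simp only [hpar]
        norm_num
        refine ⟨?_, ?_⟩
        · rw [hdm2, hj]
        · -- ((c%M)+(d%M)) % M = fib(2m+2) % M
          set am := (Nat.fib m : Int) % 1234567
          set bm := (Nat.fib (m+1) : Int) % 1234567
          have hsum : (am * (2 * bm - am) + (am * am + bm * bm))
              ≡ (Nat.fib (2*m) : Int) + (Nat.fib (2*m+1) : Int) [ZMOD 1234567] :=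
            Int.ModEq.add hcm hdm2
          have hfib : (Nat.fib (2*m) : Int) + (Nat.fib (2*m+1) : Int) = (Nat.fib (2*m+2) : Int) := by
            rw [Nat.fib_add_two]; push_cast; ring
          calc (am * (2 * bm - am) + (am * am + bm * bm)) % 1234567
              = ((Nat.fib (2*m) : Int) + (Nat.fib (2*m+1) : Int)) % 1234567 := hsum
            _ = _ := by rw [hfib, show j+1+1 = 2*m+2 by omega]

theorem loop_fib (l : List Int) (k : Nat) :
    l.foldl (fun (p : Int × Int) _ => (p.2, p.1 + p.2))
      ((Nat.fib (k+2) : Int), (Nat.fib (k+3) : Int))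
      = ((Nat.fib (k+2+l.length) : Int), (Nat.fib (k+3+l.length) : Int)) := by
  induction l generalizing k with
  | nil => simp
  | cons x t IHt =>
    simp only [List.foldl_cons, List.length_cons]
    have h2 : (Nat.fib (k+2) : Int) + (Nat.fib (k+3) : Int) = (Nat.fib (k+4) : Int) := by
      have hn : Nat.fib (k+4) = Nat.fib (k+2) + Nat.fib (k+3) := Nat.fib_add_two
      rw [hn]; push_cast; ring
    rw [h2]
    have := IHt (k+1)
    rw [show k+1+2 = k+3 by ring, show k+1+3 = k+4 by ring] at this
    rw [this]
    congr 3 <;> omega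

theorem solution_alt_eq (n : Int) (h : 0 ≤ n) :
    solution_alt n = (Nat.fib ((n+1).toNat) : Int) % 1234567 := by
  rw [solution_alt, if_neg (by omega), fibPairB_eq]

theorem solution_pos (n : Int) (h : 1 ≤ n) :
    solution n = (Nat.fib ((n+1).toNat) : Int) % 1234567 := by
  by_cases h1 : n = 1
  · subst h1; simp [solution]
  by_cases h2 : n = 2
  · subst h2; simp [solution]; decide
  have h3 : 3 ≤ n := by omega
  rw [solution, if_neg h1, if_neg h2]
  have hlen : (PySem.List.pyRange 3 n 1).length = (n-3).toNat := PySem.List.length_pyRange_one 3 n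
  have hinit : ((1 : Int), (2 : Int)) = ((Nat.fib 2 : Int), (Nat.fib 3 : Int)) := by decide
  simp only [hinit]
  rw [loop_fib, hlen]
  have hsum : (Nat.fib (2+(n-3).toNat) : Int) + (Nat.fib (3+(n-3).toNat) : Int)
      = (Nat.fib ((n+1).toNat) : Int) := by
    have hn : Nat.fib ((2+(n-3).toNat)+2) = Nat.fib (2+(n-3).toNat) + Nat.fib ((2+(n-3).toNat)+1) :=
      Nat.fib_add_two
    rw [show (n+1).toNat = (2+(n-3).toNat)+2 by omega, hn,
        show (2+(n-3).toNat)+1 = 3+(n-3).toNat by omega]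
    push_cast; ring
  rw [PySem.Int.mod_eq_emod_of_pos (by norm_num), hsum]

theorem solution_zero_alt : solution_alt 0 = 1 := by
  rw [solution_alt_eq 0 le_rfl]; decide

theorem solution_le_zero (n : Int) (h : n ≤ 0) : solution n = 3 := by
  rw [solution, if_neg (by omega), if_neg (by omega),
      PySem.List.pyRange_one_eq_nil (by omega : n ≤ 3)]
  decide

-- ===== VERDICT (by name: the statement is the Claim_ definition above) =====
theorem solution_spec : Claim_unchanged_solution := by
  intro n _ hd
  have h1 : 1 ≤ n := by unfold D_solution at hd; omega
  rw [solution_pos n h1, solution_alt_eq n (by omega)]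

theorem solution_changed : Claim_changed_solution := by
  unfold Claim_changed_solution
  refine ⟨by decide, by decide, by exact solution_le_zero 0 le_rfl, solution_zero_alt, by decide⟩

theorem solution_tight : Claim_exact_solution := by
  intro n _ hd
  have hd' : n ≤ 0 := hd
  rw [solution_le_zero n hd']
  by_cases h0 : n = 0
  · subst h0; rw [solution_zero_alt]; decide
  · rw [solution_alt, if_pos (by omega)]; decide
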